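-- pv_equiv track=rewrite | github.com/LukasLiss/totem-tool | totem_lib/src/totem_lib/occn/discover.py | _getClosestPredecessor
-- ===== SOURCE A (Python) =====
-- def _getClosestPredecessor(
--     position: int,
--     activityList: list,
--     predecessors: list,
-- ) -> tuple:
--     """
--     Finds the closest preceding event in a trace that matches the allowed predecessors.
--
--     Parameters
--     -----------
--     position
--         The current index in the trace.
--     activityList
--         List of activities in the trace.
--     predecessors
--         List of allowed predecessor activities.
--
--     Returns
--     --------
--     tuple
--         (Closest Predecessor Activity Name, Index in Trace) or (None, None).
--     """
--     if position == 0: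
--         return None, None
--     else:
--         if len(predecessors) == 0:
--             return None, None
--         else:
--             for i in range(position - 1, -1, -1):
--                 if activityList[i] in predecessors:
--                     return activityList[i], i
--             return None, None
-- ===== SOURCE B (Python) =====
-- def _getClosestPredecessor(
--     position: int,
--     activityList: list,
--     predecessors: list,
-- ) -> tuple:
--     # Forward pass: collect every allowed predecessor before `position`,
--     # then return the last (nearest) one.
--     if position <= 0 or len(predecessors) == 0:
--         return None, None
--     matches = [(activityList[i], i) for i in range(position)
--                if activityList[i] in predecessors]
--     return matches[-1] if matches else (None, None)
-- ===== Notes on version B (the rewrite author's own statement) =====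
-- stated objective: alternative
-- what changed: Replaces the backward scan with early return by a forward comprehension that collects all matching (activity, index) pairs and returns the last one.
import Mathlib
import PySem

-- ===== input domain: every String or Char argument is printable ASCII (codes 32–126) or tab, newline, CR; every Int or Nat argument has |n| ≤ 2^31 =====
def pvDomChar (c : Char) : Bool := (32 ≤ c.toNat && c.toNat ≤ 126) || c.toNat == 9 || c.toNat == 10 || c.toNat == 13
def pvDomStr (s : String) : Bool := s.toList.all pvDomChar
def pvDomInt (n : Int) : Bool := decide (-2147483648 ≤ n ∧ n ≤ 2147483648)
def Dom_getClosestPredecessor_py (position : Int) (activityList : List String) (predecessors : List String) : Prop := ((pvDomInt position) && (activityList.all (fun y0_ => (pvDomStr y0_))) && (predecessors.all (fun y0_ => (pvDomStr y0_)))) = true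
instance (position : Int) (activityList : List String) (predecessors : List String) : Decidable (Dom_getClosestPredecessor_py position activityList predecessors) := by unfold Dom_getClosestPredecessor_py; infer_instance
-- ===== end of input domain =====

-- B replaces A's backward scan with early return by a forward pass collecting all
-- matching (activity, index) pairs and returning the last one; alternative decomposition, same cost.

-- ===== PORT A =====
-- the backward 'for i in range(position-1, -1, -1)' loop with early return
def pvGoA (activityList predecessors : List String) : List Int → Option String × Option Int
  | [] => (none, none)
  | i :: rest =>
    match PySem.List.pyGet? activityList i with
    | some a => if a ∈ predecessors then (some a, some i) else pvGoA activityList predecessors rest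
    | none => (none, none)   -- IndexError: outside Pre_, value irrelevant

def getClosestPredecessor_py (position : Int) (activityList : List String) (predecessors : List String) : Option String × Option Int :=
  if position = 0 then (none, none)
  else if PySem.List.len predecessors = 0 then (none, none)
  else pvGoA activityList predecessors (PySem.List.pyRange (position - 1) (-1) (-1))

-- ===== PORT B =====
-- the comprehension's filter body: (activityList[i], i) if activityList[i] in predecessors
def pvMatch (activityList predecessors : List String) (i : Int) : Option (String × Int) :=
  match PySem.List.pyGet? activityList i with
  | some a => if a ∈ predecessors then some (a, i) else none
  | none => none   -- IndexError: outside Pre_, value irrelevant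

def getClosestPredecessor_py_alt (position : Int) (activityList : List String) (predecessors : List String) : Option String × Option Int :=
  if position ≤ 0 ∨ PySem.List.len predecessors = 0 then (none, none)
  else
    let ms := (PySem.List.pyRange 0 position 1).filterMap (pvMatch activityList predecessors)
    match PySem.List.pyGet? ms (-1) with   -- matches[-1] if matches else (None, None)
    | some (a, i) => (some a, some i)
    | none => (none, none)

-- ===== PRECONDITION & SPEC =====
-- A raises IndexError when 0 < position, predecessors ≠ [] and position > len(activityList); Pre_ excludes exactly those inputs.
def Pre_getClosestPredecessor_py (position : Int) (activityList : List String) (predecessors : List String) : Prop :=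
  position ≤ 0 ∨ predecessors = [] ∨ position ≤ (activityList.length : Int)
instance (position : Int) (activityList : List String) (predecessors : List String) : Decidable (Pre_getClosestPredecessor_py position activityList predecessors) := by unfold Pre_getClosestPredecessor_py; infer_instance

def pvWitness_getClosestPredecessor_py : Int × List String × List String := (3, ["a", "b", "c", "d"], ["b", "x"])

def Spec_getClosestPredecessor_py (position : Int) (activityList : List String) (predecessors : List String) (out : Option String × Option Int) : Prop := out = getClosestPredecessor_py_alt position activityList predecessors
instance (position : Int) (activityList : List String) (predecessors : List String) (out : Option String × Option Int) : Decidable (Spec_getClosestPredecessor_py position activityList predecessors out) := by unfold Spec_getClosestPredecessor_py; infer_instance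

-- ===== CLAIM (what is proved, stated in full; the proofs are below) =====
def Claim_equal_getClosestPredecessor_py : Prop := ∀ (position : Int) (activityList : List String) (predecessors : List String), Dom_getClosestPredecessor_py position activityList predecessors → Pre_getClosestPredecessor_py position activityList predecessors → Spec_getClosestPredecessor_py position activityList predecessors (getClosestPredecessor_py position activityList predecessors)

-- ===== LEMMAS AND PROOFS =====

-- A's early-return backward scan equals "head of the filtered list", whenever every index in the list is valid
lemma pvGoA_eq_head (activityList predecessors : List String) (l : List Int)
    (h : ∀ i ∈ l, (PySem.List.pyGet? activityList i).isSome) :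
    pvGoA activityList predecessors l =
      match (l.filterMap (pvMatch activityList predecessors)).head? with
      | some (a, i) => (some a, some i)
      | none => (none, none) := by
  induction l with
  | nil => simp [pvGoA]
  | cons i rest ih =>
    have hi : (PySem.List.pyGet? activityList i).isSome := h i (by simp)
    obtain ⟨a, ha⟩ := Option.isSome_iff_exists.mp hi
    by_cases hmem : a ∈ predecessors
    · simp [pvGoA, pvMatch, ha, hmem]
    · simp [pvGoA, pvMatch, ha, hmem, ih (fun j hj => h j (by simp [hj]))]

-- ===== VERDICT (by name: the statement is the Claim_ definition above) =====
theorem getClosestPredecessor_py_spec : Claim_equal_getClosestPredecessor_py := by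
  intro position activityList predecessors _ hpre
  unfold Spec_getClosestPredecessor_py getClosestPredecessor_py getClosestPredecessor_py_alt
  by_cases hz : position ≤ 0
  · -- A: position = 0 branch, or empty countdown range
    simp only [hz, true_or, if_pos]
    by_cases h0 : position = 0
    · simp [h0]
    · have : PySem.List.pyRange (position - 1) (-1) (-1) = [] :=
        PySem.List.pyRange_neg_one_eq_nil (by omega)
      simp [h0, this, pvGoA]
  · by_cases hp : predecessors = []
    · simp [hp, PySem.List.len]
    · -- main case: 0 < position ≤ len activityList
      have hlen : position ≤ (activityList.length : Int) := by
        rcases hpre with h | h | h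
        · omega
        · exact absurd h hp
        · exact h
      have hz' : ¬ position = 0 := by omega
      have hlp : ¬ PySem.List.len predecessors = 0 := by
        simp [PySem.List.len_eq]; exact hp
      simp only [hz', hlp, hz, or_false]
      -- rewrite A's countdown range as the reverse of B's forward range
      have hrev : PySem.List.pyRange (position - 1) (-1) (-1)
          = (PySem.List.pyRange 0 position 1).reverse := by
        rw [PySem.List.pyRange_neg_one_eq_reverse]; norm_num
      have hvalid : ∀ i ∈ PySem.List.pyRange (position - 1) (-1) (-1),
          (PySem.List.pyGet? activityList i).isSome := by
        intro i hi
        have := (PySem.List.mem_pyRange_neg_one).mp hi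
        have hne : PySem.List.pyGet? activityList i ≠ none := by
          rw [Ne, PySem.List.pyGet?_eq_none_iff, not_not, PySem.Raise.InRange]
          omega
        exact Option.isSome_iff_ne_none.mpr hne
      rw [pvGoA_eq_head activityList predecessors _ hvalid, hrev,
          List.filterMap_reverse, List.head?_reverse, PySem.List.pyGet?_neg_one]
      simp
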